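-- pv_equiv track=rewrite | github.com/RitikaKulshresth/python-practice | GFG_rearrange_A_String.py | rearrange_a_string
-- ===== SOURCE A (Python) =====
-- def rearrange_a_string(S):
--     result=''
--     sum = 0
--     for i in range(0,len(S)):
--         asciiValue = ord(S[i])
--         if asciiValue >= 65 and asciiValue<=90:
--             result+=S[i]
--         elif asciiValue >= 48 and asciiValue<=57:
--             sum+=int(S[i])
--
--     result=''.join(sorted(result))
--     if sum>0:
--         return result + str(sum)
--     else:
--         return result
-- ===== SOURCE B (Python) =====
-- def rearrange_a_string(S):
--     # one C-level scan per bucket: 26 letter counts and 10 digit counts via str.count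
--     result = ''.join(chr(c) * S.count(chr(c)) for c in range(65, 91))
--     total = sum(v * S.count(chr(48 + v)) for v in range(10))
--     return result + str(total) if total > 0 else result
-- ===== Notes on version B (the rewrite author's own statement) =====
-- stated objective: faster
-- what changed: Replaces A's per-character Python loop plus comparison sort of the collected uppercase letters (with quadratic string appends) by bucket counting: one C-level str.count scan per uppercase letter and per digit, emitting the 26 buckets in order and regrouping the digit sum by digit value.
import Mathlib
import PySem

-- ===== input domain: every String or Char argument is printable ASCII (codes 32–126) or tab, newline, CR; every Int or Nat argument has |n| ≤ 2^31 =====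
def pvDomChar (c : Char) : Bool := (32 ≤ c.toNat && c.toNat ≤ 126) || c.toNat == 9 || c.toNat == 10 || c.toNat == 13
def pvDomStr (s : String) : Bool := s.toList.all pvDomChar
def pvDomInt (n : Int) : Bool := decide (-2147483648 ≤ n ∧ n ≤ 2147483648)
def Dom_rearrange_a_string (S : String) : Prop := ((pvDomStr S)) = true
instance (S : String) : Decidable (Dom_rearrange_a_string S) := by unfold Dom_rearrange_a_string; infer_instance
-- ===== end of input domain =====

-- B replaces A's per-character loop plus comparison sort by 26 letter-bucket counts
-- and 10 digit-bucket counts taken with str.count, emitting the buckets in order.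

-- ===== PORT A =====
-- A: gather uppercase chars (in order) and the digit sum in one loop over S
-- (the Python loop 'for i in range(0,len(S)): … S[i] …' visits exactly the chars of S in order),
-- then sort the gathered chars and append str(sum) if positive.
def rearrange_a_string (S : String) : String :=
  let st := S.toList.foldl
    (fun (st : List Char × Int) c =>
      if 65 ≤ c.toNat ∧ c.toNat ≤ 90 then (st.1 ++ [c], st.2)
      else if 48 ≤ c.toNat ∧ c.toNat ≤ 57 then
        -- int(S[i]) on a digit char never raises: ofChars? is some here (proved below)
        (st.1, st.2 + (PySem.Int.ofChars? [c]).getD 0)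
      else st)
    ([], 0)
  let result := PySem.List.sorted st.1 (fun x => x) false
  if st.2 > 0 then String.ofList (result ++ PySem.Int.toChars st.2)
  else String.ofList result

-- ===== PORT B =====
-- B: ''.join(chr(c) * S.count(chr(c)) for c in range(65, 91)) and
--    sum(v * S.count(chr(48 + v)) for v in range(10)); S.count of the one-char
--    string chr(k) is PySem.Chars.count (S.toList) [Char.ofNat k] (exact).
def rearrange_a_string_alt (S : String) : String :=
  let cs := S.toList
  let result := (PySem.List.pyRange 65 91 1).flatMap
    (fun c => List.replicate (PySem.Chars.count cs [Char.ofNat c.toNat]) (Char.ofNat c.toNat))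
  let total := ((PySem.List.pyRange 0 10 1).map
    (fun v => v * (PySem.Chars.count cs [Char.ofNat (48 + v).toNat] : Int))).sum
  if total > 0 then String.ofList (result ++ PySem.Int.toChars total)
  else String.ofList result

-- ===== PRECONDITION & SPEC =====
def Spec_rearrange_a_string (S : String) (out : String) : Prop := out = rearrange_a_string_alt S
instance (S : String) (out : String) : Decidable (Spec_rearrange_a_string S out) := by unfold Spec_rearrange_a_string; infer_instance

-- ===== CLAIM (what is proved, stated in full; the proofs are below) =====
def Claim_equal_rearrange_a_string : Prop := ∀ (S : String), Dom_rearrange_a_string S → Spec_rearrange_a_string S (rearrange_a_string S)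

-- ===== LEMMAS AND PROOFS =====

-- the i-th uppercase letter
def pvLtr (i : Nat) : Char := Char.ofNat (65 + i)

-- the v-th digit character
def pvDig (v : Nat) : Char := Char.ofNat (48 + v)

-- the uppercase chars of cs, in order
def pvUp (cs : List Char) : List Char :=
  cs.filter (fun c => decide (65 ≤ c.toNat ∧ c.toNat ≤ 90))

-- the digit sum of cs
def pvDsum (cs : List Char) : Int :=
  (cs.map (fun c => if 48 ≤ c.toNat ∧ c.toNat ≤ 57 then ((c.toNat : Int) - 48) else 0)).sum

lemma pvLtr_toNat (i : Nat) (h : i < 26) : (pvLtr i).toNat = 65 + i := by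
  interval_cases i <;> decide

lemma pvDig_toNat (v : Nat) (h : v < 10) : (pvDig v).toNat = 48 + v := by
  interval_cases v <;> decide

lemma pvLtr_eq_iff (c : Char) (i : Nat) (hi : i < 26) (hc : 65 ≤ c.toNat ∧ c.toNat ≤ 90) :
    pvLtr i = c ↔ i = c.toNat - 65 := by
  constructor
  · intro h
    have := congrArg Char.toNat h
    rw [pvLtr_toNat i hi] at this
    omega
  · intro h
    have : c = Char.ofNat c.toNat := (Char.ofNat_toNat c).symm
    rw [this, pvLtr, h]
    congr 1
    omega

lemma pvDig_eq_iff (c : Char) (v : Nat) (hv : v < 10) (hc : 48 ≤ c.toNat ∧ c.toNat ≤ 57) :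
    pvDig v = c ↔ v = c.toNat - 48 := by
  constructor
  · intro h
    have := congrArg Char.toNat h
    rw [pvDig_toNat v hv] at this
    omega
  · intro h
    have : c = Char.ofNat c.toNat := (Char.ofNat_toNat c).symm
    rw [this, pvDig, h]
    congr 1
    omega

lemma ofChars_digit (c : Char) (h1 : 48 ≤ c.toNat) (h2 : c.toNat ≤ 57) :
    PySem.Int.ofChars? [c] = some ((c.toNat : Int) - 48) := by
  have hc : c = Char.ofNat c.toNat := (Char.ofNat_toNat c).symm
  interval_cases h : c.toNat <;> rw [hc] <;> decide

-- A's loop: gathered uppercase chars (in order) and the digit sum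
lemma foldA_spec (cs : List Char) (r : List Char) (s : Int) :
    cs.foldl
      (fun (st : List Char × Int) c =>
        if 65 ≤ c.toNat ∧ c.toNat ≤ 90 then (st.1 ++ [c], st.2)
        else if 48 ≤ c.toNat ∧ c.toNat ≤ 57 then
          (st.1, st.2 + (PySem.Int.ofChars? [c]).getD 0)
        else st)
      (r, s) = (r ++ pvUp cs, s + pvDsum cs) := by
  induction cs generalizing r s with
  | nil => simp [pvUp, pvDsum]
  | cons c cs ih =>
    by_cases hU : 65 ≤ c.toNat ∧ c.toNat ≤ 90
    · simp only [List.foldl_cons, if_pos hU, ih]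
      simp [pvUp, pvDsum, hU]
      omega
    · by_cases hD : 48 ≤ c.toNat ∧ c.toNat ≤ 57
      · simp only [List.foldl_cons, if_neg hU, if_pos hD, ih,
          ofChars_digit c hD.1 hD.2]
        simp [pvUp, pvDsum, hU, hD]
        omega
      · simp only [List.foldl_cons, if_neg hU, if_neg hD, ih]
        simp [pvUp, pvDsum, hU, hD]

-- Python's str.count of a single-character needle is List.count
lemma go_single (c : Char) : ∀ (cs : List Char) (fuel acc : Nat), cs.length ≤ fuel →
    PySem.Chars.count.go [c] fuel cs acc = acc + cs.count c := by
  intro cs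
  induction cs with
  | nil => intro fuel acc _; cases fuel <;> simp [PySem.Chars.count.go]
  | cons b t ih =>
    intro fuel acc h
    cases fuel with
    | zero => simp at h
    | succ f =>
      rw [PySem.Chars.count.go]
      simp only [List.isPrefixOf, List.count_cons]
      by_cases hb : c = b
      · subst hb
        simp [ih f (acc + 1) (by simpa using h)]
        omega
      · simp [Ne.symm hb, hb, ih f acc (by simpa using h)]

lemma count_single (cs : List Char) (c : Char) :
    PySem.Chars.count cs [c] = cs.count c := by
  rw [PySem.Chars.count]
  simp [go_single c cs cs.length 0 le_rfl]

-- sum over range n of an indicator picks the single index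
lemma sum_ite_range {M : Type} [AddCommMonoid M] (n j : Nat) (w : Nat → M) (hj : j < n) :
    ((List.range n).map (fun i => if i = j then w i else 0)).sum = w j := by
  induction n with
  | zero => exact absurd hj (Nat.not_lt_zero j)
  | succ n ih =>
    rw [List.range_succ, List.map_append, List.sum_append]
    by_cases h : j < n
    · rw [ih h]
      simp only [List.map_cons, List.map_nil, List.sum_cons, List.sum_nil,
        if_neg (by omega : ¬ n = j), add_zero]
    · have hn : n = j := by omega
      subst hn
      have hz : ((List.range n).map (fun i => if i = n then w i else 0)).sum = 0 :=
        List.sum_eq_zero (by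
          intro x hx
          simp only [List.mem_map, List.mem_range] at hx
          obtain ⟨i, hi, hx⟩ := hx
          rw [← hx, if_neg (by omega)])
      rw [hz]
      simp

-- the digit sum regrouped by digit value
lemma dsum_counts (cs : List Char) :
    pvDsum cs = ((List.range 10).map (fun (v : Nat) => (v : Int) * (cs.count (pvDig v) : Int))).sum := by
  induction cs with
  | nil =>
    simp [pvDsum]
  | cons c cs ih =>
    have hsplit : ((List.range 10).map
        (fun (v : Nat) => (v : Int) * ((c :: cs).count (pvDig v) : Int))).sum
        = ((List.range 10).map (fun (v : Nat) => (v : Int) * (cs.count (pvDig v) : Int))).sum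
          + ((List.range 10).map (fun (v : Nat) => if pvDig v = c then (v : Int) else 0)).sum := by
      rw [← PySem.List.sum_map_add_int]
      apply congrArg
      apply List.map_congr_left
      intro v hv
      simp only [List.mem_range] at hv
      rw [List.count_cons]
      by_cases he : pvDig v = c
      · simp [he]
        ring
      · have : ¬ ((c == pvDig v) = true) := by
          simp only [beq_iff_eq]
          intro hc
          exact he hc.symm
        simp [this, he]
    rw [hsplit, ← ih]
    by_cases hD : 48 ≤ c.toNat ∧ c.toNat ≤ 57
    · have hj : c.toNat - 48 < 10 := by omega
      have hcongr : ((List.range 10).map (fun (v : Nat) => if pvDig v = c then (v : Int) else 0)).sum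
          = ((List.range 10).map (fun (v : Nat) => if v = c.toNat - 48 then (v : Int) else 0)).sum := by
        apply congrArg
        apply List.map_congr_left
        intro v hv
        simp only [List.mem_range] at hv
        simp only [pvDig_eq_iff c v hv hD]
      rw [hcongr, sum_ite_range 10 (c.toNat - 48) (fun v => (v : Int)) hj]
      have hv : ((c.toNat - 48 : Nat) : Int) = (c.toNat : Int) - 48 := by omega
      rw [hv]
      simp only [pvDsum, List.map_cons, List.sum_cons, if_pos hD]
      omega
    · have hz : ((List.range 10).map (fun (v : Nat) => if pvDig v = c then (v : Int) else 0)).sum = 0 :=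
        List.sum_eq_zero (by
          intro x hx
          simp only [List.mem_map, List.mem_range] at hx
          obtain ⟨v, hv, hx⟩ := hx
          have : ¬ (pvDig v = c) := by
            intro hc
            have := pvDig_toNat v hv
            rw [hc] at this
            omega
          rw [← hx, if_neg this])
      rw [hz]
      simp only [pvDsum, List.map_cons, List.sum_cons, if_neg hD]
      omega

-- the counting-sort decomposition is a permutation of xs (all chars of xs uppercase)
lemma perm_decomp (xs : List Char) (h : ∀ c ∈ xs, 65 ≤ c.toNat ∧ c.toNat ≤ 90) :
    ((List.range 26).flatMap (fun i => List.replicate (xs.count (pvLtr i)) (pvLtr i))).Perm xs := by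
  rw [List.perm_iff_count]
  intro a
  rw [List.count_flatMap]
  by_cases ha : 65 ≤ a.toNat ∧ a.toNat ≤ 90
  · have hj : a.toNat - 65 < 26 := by omega
    have key : ∀ i ∈ List.range 26,
        (List.count a ∘ fun i => List.replicate (xs.count (pvLtr i)) (pvLtr i)) i
        = if i = a.toNat - 65 then xs.count a else 0 := by
      intro i hi
      simp only [List.mem_range] at hi
      simp only [Function.comp, List.count_replicate]
      by_cases he : i = a.toNat - 65
      · subst he
        have hla : pvLtr (a.toNat - 65) = a := (pvLtr_eq_iff a _ hi ha).mpr rfl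
        simp [hla]
      · have hla : ¬ (pvLtr i = a) := by rw [pvLtr_eq_iff a i hi ha]; exact he
        simp [he]
        intro hc
        exact absurd hc hla
    rw [List.map_congr_left key]
    exact sum_ite_range 26 (a.toNat - 65) (fun _ => xs.count a) hj
  · have key : ∀ i ∈ List.range 26,
        (List.count a ∘ fun i => List.replicate (xs.count (pvLtr i)) (pvLtr i)) i = 0 := by
      intro i hi
      simp only [List.mem_range] at hi
      simp only [Function.comp, List.count_replicate]
      have : ¬ (pvLtr i == a) = true := by
        simp only [beq_iff_eq]
        intro hc
        have := pvLtr_toNat i hi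
        rw [hc] at this
        omega
      simp [this]
    rw [List.map_congr_left key]
    have h0 : xs.count a = 0 := by
      rw [List.count_eq_zero]
      intro hm
      exact ha (h a hm)
    rw [h0]
    simp

-- the decomposition is weakly increasing
lemma pairwise_decomp (k : Nat → Nat) :
    ((List.range 26).flatMap (fun i => List.replicate (k i) (pvLtr i))).Pairwise
      (fun x1 x2 => x1 ≤ x2) := by
  rw [List.pairwise_flatMap]
  constructor
  · intro i _
    exact List.pairwise_replicate_of_refl
  · apply List.Pairwise.imp_of_mem ?_ List.pairwise_lt_range
    intro i j hi hj hij x hx y hy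
    simp only [List.mem_range] at hi hj
    rw [List.eq_of_mem_replicate hx, List.eq_of_mem_replicate hy]
    rw [Char.le_def]
    have h1 := pvLtr_toNat i hi
    have h2 := pvLtr_toNat j hj
    have : (pvLtr i).toNat ≤ (pvLtr j).toNat := by omega
    exact_mod_cast this

-- elements of pvUp are uppercase
lemma pvUp_upper (cs : List Char) : ∀ c ∈ pvUp cs, 65 ≤ c.toNat ∧ c.toNat ≤ 90 := by
  intro c hc
  simp only [pvUp, List.mem_filter, decide_eq_true_eq] at hc
  exact hc.2

-- filtering to uppercase keeps every occurrence of an uppercase letter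
lemma count_pvUp (cs : List Char) (i : Nat) (hi : i < 26) :
    (pvUp cs).count (pvLtr i) = cs.count (pvLtr i) := by
  apply List.count_filter
  have := pvLtr_toNat i hi
  simp only [decide_eq_true_eq]
  omega

-- sorting the uppercase chars IS the counting-sort decomposition
lemma sorted_eq_decomp (xs : List Char) (h : ∀ c ∈ xs, 65 ≤ c.toNat ∧ c.toNat ≤ 90) :
    PySem.List.sorted xs (fun x => x) false
      = (List.range 26).flatMap (fun i => List.replicate (xs.count (pvLtr i)) (pvLtr i)) := by
  exact PySem.List.sorted_id_eq_of_perm_of_pairwise _ _ (perm_decomp xs h) (pairwise_decomp _)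

-- ===== VERDICT (by name: the statement is the Claim_ definition above) =====
theorem rearrange_a_string_spec : Claim_equal_rearrange_a_string := by
  intro S _
  unfold Spec_rearrange_a_string rearrange_a_string rearrange_a_string_alt
  simp only [foldA_spec, List.nil_append, Int.zero_add]
  have hsum : ((PySem.List.pyRange 0 10 1).map
      (fun v => v * (PySem.Chars.count S.toList [Char.ofNat (48 + v).toNat] : Int))).sum
      = pvDsum S.toList := by
    have hpr : PySem.List.pyRange 0 10 1 = List.map (fun i : Nat => (i : Int)) (List.range 10) := by
      decide
    rw [hpr, List.map_map, dsum_counts]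
    apply congrArg
    apply List.map_congr_left
    intro v hv
    simp only [List.mem_range] at hv
    simp only [Function.comp]
    have h1 : ((48 : Int) + (v : Int)).toNat = 48 + v := by omega
    rw [h1, count_single]
    rfl
  have hres : PySem.List.sorted (pvUp S.toList) (fun x => x) false
      = (PySem.List.pyRange 65 91 1).flatMap
        (fun c => List.replicate (PySem.Chars.count S.toList [Char.ofNat c.toNat])
          (Char.ofNat c.toNat)) := by
    rw [sorted_eq_decomp _ (pvUp_upper S.toList)]
    have hpr : PySem.List.pyRange 65 91 1
        = List.map (fun i : Nat => ((65 + i : Nat) : Int)) (List.range 26) := by decide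
    rw [hpr, List.flatMap_map]
    apply List.flatMap_congr
    intro i hi
    simp only [List.mem_range] at hi
    have h1 : (((65 + i : Nat) : Int)).toNat = 65 + i := by omega
    rw [h1, count_single, count_pvUp S.toList i hi]
    rfl
  rw [hres, hsum]
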